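-- pv_equiv track=rewrite | github.com/MokhtariDev111/PFE | modules/quiz_generation/quiz_exporter.py | _stats_bar
-- ===== SOURCE A (Python) =====
-- def _stats_bar(questions: list) -> str:
--     total  = len(questions)
--     easy   = sum(1 for q in questions if q.get("difficulty") == "easy")
--     medium = sum(1 for q in questions if q.get("difficulty") == "medium")
--     hard   = sum(1 for q in questions if q.get("difficulty") == "hard")
--     mcq    = sum(1 for q in questions if q.get("format")    == "mcq")
--     tf     = sum(1 for q in questions if q.get("format")    == "true_false")
--     sa     = sum(1 for q in questions if q.get("format")    == "short_answer")
--     imgs   = sum(1 for q in questions if q.get("type")      == "image")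
--
--     img_chip = f'<span class="stat-chip">🖼 {imgs} Image</span>' if imgs else ""
--
--     return f"""    <div class="stats-bar">
--   <span class="stat-chip">📝 {total} Questions</span>
--   <span class="stat-chip chip-easy">🟢 {easy} Easy</span>
--   <span class="stat-chip chip-med">🟡 {medium} Medium</span>
--   <span class="stat-chip chip-hard">🔴 {hard} Hard</span>
--   <span class="stat-chip">MCQ: {mcq}</span>
--   <span class="stat-chip">T/F: {tf}</span>
--   <span class="stat-chip">SA: {sa}</span>
--   {img_chip}
-- </div>"""
-- ===== SOURCE B (Python) =====
-- def _stats_bar(questions: list) -> str: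
--     # One pass with plain int accumulators (if/elif chains), then build the chip
--     # lines as a list and join them -- instead of A's seven comprehension passes
--     # and one big f-string.
--     easy = medium = hard = mcq = tf = sa = imgs = 0
--     for q in questions:
--         d = q.get("difficulty")
--         f = q.get("format")
--         t = q.get("type")
--         if d == "easy":
--             easy += 1
--         elif d == "medium":
--             medium += 1
--         elif d == "hard":
--             hard += 1
--         if f == "mcq":
--             mcq += 1
--         elif f == "true_false":
--             tf += 1
--         elif f == "short_answer":
--             sa += 1
--         if t == "image":
--             imgs += 1
--     chips = [
--         f'<span class="stat-chip">📝 {len(questions)} Questions</span>',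
--         f'<span class="stat-chip chip-easy">🟢 {easy} Easy</span>',
--         f'<span class="stat-chip chip-med">🟡 {medium} Medium</span>',
--         f'<span class="stat-chip chip-hard">🔴 {hard} Hard</span>',
--         f'<span class="stat-chip">MCQ: {mcq}</span>',
--         f'<span class="stat-chip">T/F: {tf}</span>',
--         f'<span class="stat-chip">SA: {sa}</span>',
--         f'<span class="stat-chip">🖼 {imgs} Image</span>' if imgs else "",
--     ]
--     return '    <div class="stats-bar">\n  ' + "\n  ".join(chips) + "\n</div>"
-- ===== Notes on version B (the rewrite author's own statement) =====
-- stated objective: alternative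
-- what changed: A makes seven separate comprehension passes over questions and formats one big f-string; B counts all seven categories in a single loop with plain if/elif accumulators and builds the HTML by joining a list of chip lines.
import Mathlib
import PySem

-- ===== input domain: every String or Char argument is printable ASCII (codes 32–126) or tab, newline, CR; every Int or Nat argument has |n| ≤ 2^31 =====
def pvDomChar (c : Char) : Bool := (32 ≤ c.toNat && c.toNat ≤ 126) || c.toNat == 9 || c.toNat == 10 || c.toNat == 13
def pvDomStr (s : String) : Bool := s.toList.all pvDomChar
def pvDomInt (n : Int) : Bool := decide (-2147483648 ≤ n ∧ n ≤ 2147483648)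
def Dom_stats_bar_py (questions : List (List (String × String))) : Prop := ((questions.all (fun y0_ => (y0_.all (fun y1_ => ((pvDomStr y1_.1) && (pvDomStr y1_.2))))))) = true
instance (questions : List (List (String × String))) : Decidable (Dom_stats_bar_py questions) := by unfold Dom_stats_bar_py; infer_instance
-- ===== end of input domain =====

-- B replaces A's seven comprehension passes and one big f-string by a single
-- counting pass with if/elif accumulators and a joined list of chip lines.

-- ===== PORT A =====
-- port of A's 'sum(1 for q in questions if q.get(key) == val)' genexp shape
def pvSumIf (questions : List (List (String × String))) (key val : String) : Int :=
  questions.foldl (fun acc q => if (PySem.Dict.mk q).get? key = some val then acc + 1 else acc) 0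

def stats_bar_py (questions : List (List (String × String))) : String :=
  let total : Int := questions.length
  let easy := pvSumIf questions "difficulty" "easy"
  let medium := pvSumIf questions "difficulty" "medium"
  let hard := pvSumIf questions "difficulty" "hard"
  let mcq := pvSumIf questions "format" "mcq"
  let tf := pvSumIf questions "format" "true_false"
  let sa := pvSumIf questions "format" "short_answer"
  let imgs := pvSumIf questions "type" "image"
  let img_chip := if imgs ≠ 0 then "<span class=\"stat-chip\">🖼 " ++ PySem.Int.toStr imgs ++ " Image</span>" else ""
  "    <div class=\"stats-bar\">\n  <span class=\"stat-chip\">📝 " ++ PySem.Int.toStr total ++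
  " Questions</span>\n  <span class=\"stat-chip chip-easy\">🟢 " ++ PySem.Int.toStr easy ++
  " Easy</span>\n  <span class=\"stat-chip chip-med\">🟡 " ++ PySem.Int.toStr medium ++
  " Medium</span>\n  <span class=\"stat-chip chip-hard\">🔴 " ++ PySem.Int.toStr hard ++
  " Hard</span>\n  <span class=\"stat-chip\">MCQ: " ++ PySem.Int.toStr mcq ++
  "</span>\n  <span class=\"stat-chip\">T/F: " ++ PySem.Int.toStr tf ++
  "</span>\n  <span class=\"stat-chip\">SA: " ++ PySem.Int.toStr sa ++
  "</span>\n  " ++ img_chip ++ "\n</div>"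

-- ===== PORT B =====
-- Source B's seven plain int accumulators, carried through one loop
structure PVCounts where
  easy : Int
  medium : Int
  hard : Int
  mcq : Int
  tf : Int
  sa : Int
  imgs : Int
deriving Repr, DecidableEq

-- the body of Source B's 'for q in questions' loop (if/elif chains)
def pvTally (c : PVCounts) (q : List (String × String)) : PVCounts :=
  let d := (PySem.Dict.mk q).get? "difficulty"
  let f := (PySem.Dict.mk q).get? "format"
  let t := (PySem.Dict.mk q).get? "type"
  let c1 := if d = some "easy" then { c with easy := c.easy + 1 }
            else if d = some "medium" then { c with medium := c.medium + 1 }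
            else if d = some "hard" then { c with hard := c.hard + 1 } else c
  let c2 := if f = some "mcq" then { c1 with mcq := c1.mcq + 1 }
            else if f = some "true_false" then { c1 with tf := c1.tf + 1 }
            else if f = some "short_answer" then { c1 with sa := c1.sa + 1 } else c1
  if t = some "image" then { c2 with imgs := c2.imgs + 1 } else c2

def stats_bar_py_alt (questions : List (List (String × String))) : String :=
  let c := questions.foldl pvTally ⟨0, 0, 0, 0, 0, 0, 0⟩
  let chips : List String := [
    "<span class=\"stat-chip\">📝 " ++ PySem.Int.toStr (questions.length : Int) ++ " Questions</span>",
    "<span class=\"stat-chip chip-easy\">🟢 " ++ PySem.Int.toStr c.easy ++ " Easy</span>",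
    "<span class=\"stat-chip chip-med\">🟡 " ++ PySem.Int.toStr c.medium ++ " Medium</span>",
    "<span class=\"stat-chip chip-hard\">🔴 " ++ PySem.Int.toStr c.hard ++ " Hard</span>",
    "<span class=\"stat-chip\">MCQ: " ++ PySem.Int.toStr c.mcq ++ "</span>",
    "<span class=\"stat-chip\">T/F: " ++ PySem.Int.toStr c.tf ++ "</span>",
    "<span class=\"stat-chip\">SA: " ++ PySem.Int.toStr c.sa ++ "</span>",
    if c.imgs ≠ 0 then "<span class=\"stat-chip\">🖼 " ++ PySem.Int.toStr c.imgs ++ " Image</span>" else ""]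
  "    <div class=\"stats-bar\">\n  " ++ PySem.Str.join "\n  " chips ++ "\n</div>"

-- ===== PRECONDITION & SPEC =====
def Spec_stats_bar_py (questions : List (List (String × String))) (out : String) : Prop := out = stats_bar_py_alt questions
instance (questions : List (List (String × String))) (out : String) : Decidable (Spec_stats_bar_py questions out) := by unfold Spec_stats_bar_py; infer_instance

-- ===== CLAIM =====
def Claim_equal_stats_bar_py : Prop := ∀ (questions : List (List (String × String))), Dom_stats_bar_py questions → Spec_stats_bar_py questions (stats_bar_py questions)

-- ===== LEMMAS AND PROOFS =====

lemma pvSumIf_cons (q : List (String × String)) (qs : List (List (String × String))) (k v : String) :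
    pvSumIf (q :: qs) k v =
      (if (PySem.Dict.mk q).get? k = some v then 1 else 0) + pvSumIf qs k v := by
  simp only [pvSumIf, List.foldl_cons]
  rw [PySem.List.foldl_ite_add_one, PySem.List.foldl_ite_add_one]
  split_ifs <;> omega

lemma pvTally_easy (c : PVCounts) (q : List (String × String)) :
    (pvTally c q).easy = c.easy + (if (PySem.Dict.mk q).get? "difficulty" = some "easy" then 1 else 0) := by
  unfold pvTally
  simp only [apply_ite PVCounts.easy]
  split_ifs <;> simp_all

lemma pvTally_medium (c : PVCounts) (q : List (String × String)) :
    (pvTally c q).medium = c.medium + (if (PySem.Dict.mk q).get? "difficulty" = some "medium" then 1 else 0) := by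
  unfold pvTally
  simp only [apply_ite PVCounts.medium]
  split_ifs <;> simp_all

lemma pvTally_hard (c : PVCounts) (q : List (String × String)) :
    (pvTally c q).hard = c.hard + (if (PySem.Dict.mk q).get? "difficulty" = some "hard" then 1 else 0) := by
  unfold pvTally
  simp only [apply_ite PVCounts.hard]
  split_ifs <;> simp_all

lemma pvTally_mcq (c : PVCounts) (q : List (String × String)) :
    (pvTally c q).mcq = c.mcq + (if (PySem.Dict.mk q).get? "format" = some "mcq" then 1 else 0) := by
  unfold pvTally
  simp only [apply_ite PVCounts.mcq]
  split_ifs <;> simp_all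

lemma pvTally_tf (c : PVCounts) (q : List (String × String)) :
    (pvTally c q).tf = c.tf + (if (PySem.Dict.mk q).get? "format" = some "true_false" then 1 else 0) := by
  unfold pvTally
  simp only [apply_ite PVCounts.tf]
  split_ifs <;> simp_all

lemma pvTally_sa (c : PVCounts) (q : List (String × String)) :
    (pvTally c q).sa = c.sa + (if (PySem.Dict.mk q).get? "format" = some "short_answer" then 1 else 0) := by
  unfold pvTally
  simp only [apply_ite PVCounts.sa]
  split_ifs <;> simp_all

lemma pvTally_imgs (c : PVCounts) (q : List (String × String)) :
    (pvTally c q).imgs = c.imgs + (if (PySem.Dict.mk q).get? "type" = some "image" then 1 else 0) := by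
  unfold pvTally
  simp only [apply_ite PVCounts.imgs]
  split_ifs <;> simp_all

lemma pv_fold_counts : ∀ (qs : List (List (String × String))) (c : PVCounts),
    qs.foldl pvTally c =
      ⟨c.easy + pvSumIf qs "difficulty" "easy",
       c.medium + pvSumIf qs "difficulty" "medium",
       c.hard + pvSumIf qs "difficulty" "hard",
       c.mcq + pvSumIf qs "format" "mcq",
       c.tf + pvSumIf qs "format" "true_false",
       c.sa + pvSumIf qs "format" "short_answer",
       c.imgs + pvSumIf qs "type" "image"⟩ := by
  intro qs
  induction qs with
  | nil => intro c; simp [pvSumIf]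
  | cons q qs ih =>
    intro c
    simp only [List.foldl_cons, ih, pvSumIf_cons,
      pvTally_easy, pvTally_medium, pvTally_hard, pvTally_mcq, pvTally_tf, pvTally_sa, pvTally_imgs,
      PVCounts.mk.injEq]
    refine ⟨by omega, by omega, by omega, by omega, by omega, by omega, by omega⟩

lemma pv_join8 (s a b c d e f g h : String) :
    PySem.Str.join s [a, b, c, d, e, f, g, h] =
      a ++ s ++ b ++ s ++ c ++ s ++ d ++ s ++ e ++ s ++ f ++ s ++ g ++ s ++ h := by
  rw [← String.toList_inj]
  simp [PySem.Str.join, PySem.Chars.join, List.intercalate]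

-- ===== VERDICT =====
set_option maxHeartbeats 2000000 in
set_option maxRecDepth 10000 in
theorem stats_bar_py_spec : Claim_equal_stats_bar_py := by
  intro questions _
  unfold Spec_stats_bar_py stats_bar_py stats_bar_py_alt
  simp only [pv_fold_counts, pv_join8]
  rw [← String.toList_inj]
  simp only [String.toList_append, List.append_assoc, Int.zero_add]
  split_ifs <;> rfl
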